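-- pv_equiv track=rewrite | github.com/VectorSpaceHQ/VSFeedSpeed | src/vsfeedspeed.py | find_nearest_low
-- ===== SOURCE A (Python) =====
-- def find_nearest_low(array, value):
--     idx = 0
--     max_val = 0
--     for i, x in enumerate(array):
--         if x == value:
--             return value
--         elif (value - x) > 0:
--             if x > max_val:
--                 max_val = x
--                 idx = i
--     return array[idx]
-- ===== SOURCE B (Python) =====
-- def find_nearest_low(array, value):
--     if any(x == value for x in array):
--         return value
--     candidates = [x for x in array if 0 < x < value]
--     if candidates:
--         return max(candidates)
--     return array[0]
-- ===== Notes on version B (the rewrite author's own statement) =====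
-- stated objective: simpler
-- what changed: Replaces the single-pass enumerate loop that tracks (idx, max_val) with early return by a filter-and-reduce decomposition: a membership check, then max over the list of elements strictly between 0 and value, falling back to array[0].
import Mathlib
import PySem

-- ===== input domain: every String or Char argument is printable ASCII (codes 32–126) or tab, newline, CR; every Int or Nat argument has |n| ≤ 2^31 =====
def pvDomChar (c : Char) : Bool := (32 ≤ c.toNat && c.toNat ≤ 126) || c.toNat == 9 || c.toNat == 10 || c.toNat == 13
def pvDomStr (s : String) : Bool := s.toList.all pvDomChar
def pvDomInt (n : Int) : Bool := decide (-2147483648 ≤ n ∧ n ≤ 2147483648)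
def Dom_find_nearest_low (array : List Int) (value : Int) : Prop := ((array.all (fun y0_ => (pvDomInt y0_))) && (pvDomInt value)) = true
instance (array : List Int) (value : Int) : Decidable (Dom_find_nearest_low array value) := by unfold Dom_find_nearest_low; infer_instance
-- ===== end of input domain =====

-- B replaces A's single-pass (idx, max_val)-tracking loop by a filter-and-reduce
-- decomposition (membership check, then max over elements strictly between 0 and value,
-- falling back to array[0]); objective: simpler.


-- ===== PORT A =====
-- the for-loop over enumerate(array) with early return, state (idx, max_val);
-- Sum.inl = early 'return value', Sum.inr = loop finished with final state
def fnlA_go (value : Int) : List (Int × Int) → Int → Int → Sum Int (Int × Int)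
  | [], idx, max_val => Sum.inr (idx, max_val)
  | (i, x) :: rest, idx, max_val =>
    if x = value then Sum.inl value
    else if value - x > 0 then
      if x > max_val then fnlA_go value rest i x
      else fnlA_go value rest idx max_val
    else fnlA_go value rest idx max_val

def find_nearest_low (array : List Int) (value : Int) : Int :=
  match fnlA_go value (PySem.List.enumerate array) 0 0 with
  | Sum.inl v => v
  | Sum.inr (idx, _) => (PySem.List.pyGet? array idx).getD 0  -- none = IndexError, excluded by Pre_

-- ===== PORT B =====
def find_nearest_low_alt (array : List Int) (value : Int) : Int :=
  if array.any (fun x => x == value) then value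
  else
    let candidates := array.filter (fun x => decide (0 < x) && decide (x < value))
    match PySem.List.max? candidates (fun x => x) with
    | some m => m
    | none => (PySem.List.pyGet? array 0).getD 0  -- none = IndexError, excluded by Pre_

-- ===== PRECONDITION & SPEC =====
-- Pre_ excludes only the empty array, on which both Pythons raise IndexError (array[0]).
def Pre_find_nearest_low (array : List Int) (_value : Int) : Prop := array ≠ []
instance (array : List Int) (value : Int) : Decidable (Pre_find_nearest_low array value) := by unfold Pre_find_nearest_low; infer_instance

def pvWitness_find_nearest_low : List Int × Int := ([3, 7, 5], 6)

def Spec_find_nearest_low (array : List Int) (value : Int) (out : Int) : Prop := out = find_nearest_low_alt array value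
instance (array : List Int) (value : Int) (out : Int) : Decidable (Spec_find_nearest_low array value out) := by unfold Spec_find_nearest_low; infer_instance

-- ===== CLAIM (what is proved, stated in full; the proofs are below) =====
def Claim_equal_find_nearest_low : Prop := ∀ (array : List Int) (value : Int), Dom_find_nearest_low array value → Pre_find_nearest_low array value → Spec_find_nearest_low array value (find_nearest_low array value)

-- ===== LEMMAS AND PROOFS =====

-- dropping elements ≤ b from a (· < value)-filter does not change a running max started at a ≥ b
lemma filter_lower (value : Int) : ∀ (l : List Int) (a b : Int), b ≤ a →
    ((l.filter (fun z => decide (b < z) && decide (z < value))).foldl max a) =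
    ((l.filter (fun z => decide (z < value))).foldl max a) := by
  intro l
  induction l with
  | nil => intro a b _; rfl
  | cons z rest ih =>
    intro a b hba
    by_cases hzv : z < value
    · by_cases hbz : b < z
      · rw [List.filter_cons, List.filter_cons, if_pos (by simp [hbz, hzv]),
          if_pos (by simp [hzv]), List.foldl_cons, List.foldl_cons]
        exact ih (max a z) b (le_trans hba (le_max_left a z))
      · have hmax : max a z = a := max_eq_left (le_trans (not_lt.mp hbz) hba)
        rw [List.filter_cons, List.filter_cons, if_neg (by simp [hbz]),
          if_pos (by simp [hzv]), List.foldl_cons, hmax]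
        exact ih a b hba
    · rw [List.filter_cons, List.filter_cons, if_neg (by simp [hzv]), if_neg (by simp [hzv])]
      exact ih a b hba

-- max-of-the-(x<·)-filtered-list-with-fallback-x equals a running max over the (·<value)-filter
lemma match_foldl (value : Int) : ∀ (rest : List Int) (x : Int),
    (match rest.filter (fun z => decide (x < z) && decide (z < value)) with
     | [] => x
     | y :: t => t.foldl max y) =
    ((rest.filter (fun z => decide (z < value))).foldl max x) := by
  intro rest
  induction rest with
  | nil => intro x; rfl
  | cons z t ih =>
    intro x
    by_cases hzv : z < value
    · by_cases hxz : x < z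
      · rw [List.filter_cons, List.filter_cons, if_pos (by simp [hxz, hzv]),
          if_pos (by simp [hzv]), List.foldl_cons, max_eq_right (le_of_lt hxz),
          ← filter_lower value t z x (le_of_lt hxz)]
      · rw [List.filter_cons, List.filter_cons, if_neg (by simp [hxz]),
          if_pos (by simp [hzv]), List.foldl_cons, max_eq_left (not_lt.mp hxz)]
        exact ih x
    · rw [List.filter_cons, List.filter_cons, if_neg (by simp [hzv]), if_neg (by simp [hzv])]
      exact ih x

-- characterisation of A's loop against the filter-and-reduce shape, generalised over the state
lemma go_spec (array : List Int) (value : Int) :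
    ∀ (l : List (Int × Int)) (idx maxv : Int),
    (∀ p ∈ l, PySem.List.pyGet? array p.1 = some p.2) → 0 ≤ maxv →
    (match fnlA_go value l idx maxv with
     | Sum.inl v => v
     | Sum.inr (j, _) => (PySem.List.pyGet? array j).getD 0) =
    (if (l.map Prod.snd).any (fun x => x == value) then value
     else match (l.map Prod.snd).filter (fun x => decide (maxv < x) && decide (x < value)) with
          | [] => (PySem.List.pyGet? array idx).getD 0
          | y :: t => t.foldl max y) := by
  intro l
  induction l with
  | nil => intro idx maxv _ _; rfl
  | cons p rest ih =>
    intro idx maxv h1 hm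
    obtain ⟨i, x⟩ := p
    by_cases hxv : x = value
    · simp [fnlA_go, hxv]
    · have hrest : ∀ p ∈ rest, PySem.List.pyGet? array p.1 = some p.2 :=
        fun q hq => h1 q (List.mem_cons_of_mem _ hq)
      by_cases hupd : maxv < x ∧ x < value
      · -- update branch: new state (i, x)
        have h2 : value - x > 0 := by omega
        have hgo : fnlA_go value ((i, x) :: rest) idx maxv = fnlA_go value rest i x := by
          show (if x = value then Sum.inl value
                else if value - x > 0 then
                  if x > maxv then fnlA_go value rest i x else fnlA_go value rest idx maxv
                else fnlA_go value rest idx maxv) = fnlA_go value rest i x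
          rw [if_neg hxv, if_pos h2, if_pos hupd.1]
        have hi : PySem.List.pyGet? array i = some x := h1 (i, x) (List.mem_cons_self)
        rw [hgo, ih i x hrest (le_trans hm (le_of_lt hupd.1))]
        cases ha : ((rest.map Prod.snd).any (fun y => y == value)) with
        | true => simp [ha]
        | false =>
          simp only [List.map_cons, List.any_cons]
          rw [if_neg Bool.false_ne_true,
            if_neg (show ¬ ((x == value || ((rest.map Prod.snd).any fun y => y == value)) = true) by
                simp [hxv, ha]),
            List.filter_cons, if_pos (show (decide (maxv < x) && decide (x < value)) = true by
                simp [hupd.1, hupd.2]),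
            hi]
          simp only [Option.getD_some]
          rw [match_foldl value (rest.map Prod.snd) x,
            ← filter_lower value (rest.map Prod.snd) x maxv (le_of_lt hupd.1)]
      · -- skip branch: state unchanged (covers both value - x ≤ 0 and x ≤ max_val)
        have hgo : fnlA_go value ((i, x) :: rest) idx maxv = fnlA_go value rest idx maxv := by
          show (if x = value then Sum.inl value
                else if value - x > 0 then
                  if x > maxv then fnlA_go value rest i x else fnlA_go value rest idx maxv
                else fnlA_go value rest idx maxv) = fnlA_go value rest idx maxv
          by_cases h2 : value - x > 0
          · have h3 : ¬ x > maxv := by omega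
            rw [if_neg hxv, if_pos h2, if_neg h3]
          · rw [if_neg hxv, if_neg h2]
        have hfc : ((x :: rest.map Prod.snd).filter
            (fun y => decide (maxv < y) && decide (y < value))) =
            ((rest.map Prod.snd).filter (fun y => decide (maxv < y) && decide (y < value))) := by
          rw [List.filter_cons, if_neg (by simp; intro h; omega)]
        rw [hgo, ih idx maxv hrest hm]
        cases ha : ((rest.map Prod.snd).any (fun y => y == value)) with
        | true => simp [ha]
        | false =>
          simp only [List.map_cons, List.any_cons]
          rw [if_neg Bool.false_ne_true,
            if_neg (show ¬ ((x == value || ((rest.map Prod.snd).any fun y => y == value)) = true) by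
                simp [hxv, ha]),
            hfc]

-- every pair of enumerate array indexes back into array
lemma enum_lookup (array : List Int) :
    ∀ p ∈ PySem.List.enumerate array, PySem.List.pyGet? array p.1 = some p.2 := by
  intro p hp
  rw [PySem.List.mem_enumerate_iff] at hp
  obtain ⟨k, hk, rfl⟩ := hp
  simp [hk]

-- ===== VERDICT (by name: the statement is the Claim_ definition above) =====
theorem find_nearest_low_spec : Claim_equal_find_nearest_low := by
  intro array value _ _
  unfold Spec_find_nearest_low find_nearest_low find_nearest_low_alt
  rw [go_spec array value (PySem.List.enumerate array) 0 0 (enum_lookup array) le_rfl]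
  rw [PySem.List.map_snd_enumerate]
  by_cases ha : array.any (fun x => x == value) = true
  · simp [ha]
  · simp only [ha, if_false, Bool.false_eq_true]
    cases hf : array.filter (fun x => decide (0 < x) && decide (x < value)) with
    | nil => simp [PySem.List.max?]
    | cons y t => rw [PySem.List.max?_id_cons]
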